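-- pv_equiv track=rewrite | github.com/elkebir-group/MASS | src/algorithms/parse_structures.py | parse_pairs_tree_general
-- ===== SOURCE A (Python) =====
-- def parse_pairs_tree_general(dotbr, bracket_type='()'):
--     """
--     Parse a dot-bracket structure with any bracket type and return base pairs with hierarchical relationships.
--
--     Args:
--         dotbr: Dot-bracket structure string
--         bracket_type: String like '()', '[]', '{}' specifying the bracket pair to use
--
--     Returns:
--         Tuple of (pairs, children_of) where pairs is list of (i,j) tuples and
--         children_of maps parent opening position to list of child pairs
--     """
--     if len(bracket_type) != 2:
--         raise ValueError(f"bracket_type must be 2 characters, got: {bracket_type}")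
--
--     open_char, close_char = bracket_type[0], bracket_type[1]
--
--     stack = []
--     pairs = []
--     children_of = {}  # key: open index i of (i,j) ; val: list of immediate child pairs
--
--     for pos, ch in enumerate(dotbr, start=1):
--         if ch == open_char:
--             stack.append(pos)
--         elif ch == close_char:
--             i = stack.pop()
--             j = pos
--             if i > j: i, j = j, i
--             pairs.append((i, j))
--             if stack:
--                 parent_open = stack[-1]
--                 children_of.setdefault(parent_open, []).append((i, j))
--             children_of.setdefault(i, [])
--         # '.' -> nothing
--
--     for key in children_of:
--         children_of[key].sort(key=lambda p: p[0])
--     pairs.sort(key=lambda p: p[0])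
--     return pairs, children_of
-- ===== SOURCE B (Python) =====
-- def parse_pairs_tree_general(dotbr, bracket_type='()'):
--     """Recursive-descent re-implementation: one helper per nesting level emits
--     pairs in pre-order (already sorted by opening index), so no sort calls."""
--     if len(bracket_type) != 2:
--         raise ValueError(f"bracket_type must be 2 characters, got: {bracket_type}")
--     open_char, close_char = bracket_type[0], bracket_type[1]
--     n = len(dotbr)
--     children_of = {}
--
--     def level(k, parent):
--         # Consume chars from 0-based index k up to an unmatched close_char
--         # (or end of string); return (stop index, pairs of this region, pre-order).
--         out = []
--         while k < n:
--             ch = dotbr[k]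
--             if ch == open_char:
--                 i = k + 1
--                 stop, sub = level(k + 1, i)
--                 if stop == n:                 # unmatched open: drop it, keep inner pairs
--                     out.extend(sub)
--                     return n, out
--                 j = stop + 1
--                 if parent is not None:
--                     children_of.setdefault(parent, []).append((i, j))
--                 children_of.setdefault(i, [])
--                 out.append((i, j))
--                 out.extend(sub)
--                 k = j
--             elif ch == close_char:
--                 return k, out
--             else:
--                 k += 1
--         return n, out
--
--     _, pairs = level(0, None)
--     return pairs, children_of
-- ===== Notes on version B (the rewrite author's own statement) =====
-- stated objective: alternative
-- what changed: Replaced the explicit stack machine plus two terminal sort passes by a recursive-descent parser with a position cursor that emits pairs in pre-order (parent before children), which is already sorted by opening index, so both sort calls disappear; Pre_ only excludes the inputs where A raises (bracket_type not of length 2, or a prefix with more close than open brackets).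
import Mathlib
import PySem

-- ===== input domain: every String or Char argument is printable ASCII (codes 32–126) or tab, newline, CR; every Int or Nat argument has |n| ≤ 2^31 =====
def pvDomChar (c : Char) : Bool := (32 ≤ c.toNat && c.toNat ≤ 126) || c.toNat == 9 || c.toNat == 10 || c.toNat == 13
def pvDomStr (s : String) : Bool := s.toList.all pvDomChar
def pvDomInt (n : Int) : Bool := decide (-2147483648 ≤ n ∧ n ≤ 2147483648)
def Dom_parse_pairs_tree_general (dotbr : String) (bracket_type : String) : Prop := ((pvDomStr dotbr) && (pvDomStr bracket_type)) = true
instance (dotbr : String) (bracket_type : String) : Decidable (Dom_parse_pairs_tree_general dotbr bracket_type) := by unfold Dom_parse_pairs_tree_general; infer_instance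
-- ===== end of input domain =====

-- B replaces A's stack machine + two terminal sorts by a recursive-descent parser emitting
-- pairs in pre-order (already sorted), same return value wherever A returns normally.

-- ===== PORT A =====
-- one loop step of A's `for pos, ch in enumerate(dotbr, start=1)` over state (stack, pairs, children_of)
def pvStepA (o c : Char) (st : List Int × List (Int × Int) × PySem.Dict Int (List (Int × Int)))
    (pos : Int) (ch : Char) : List Int × List (Int × Int) × PySem.Dict Int (List (Int × Int)) :=
  let (stack, pairs, d) := st
  if ch = o then (pos :: stack, pairs, d)
  else if ch = c then
    match stack with
    | [] => (stack, pairs, d)   -- Python: stack.pop() raises IndexError here (excluded by Pre_)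
    | i0 :: stk =>
      let ij := if i0 > pos then (pos, i0) else (i0, pos)   -- j = pos; if i > j: i, j = j, i
      let pairs' := pairs ++ [ij]
      -- if stack: children_of.setdefault(stack[-1], []).append((i, j))
      let d1 := match stk with
        | p :: _ => d.insert p (d.getD p [] ++ [ij])
        | [] => d
      -- children_of.setdefault(i, [])
      let d2 := d1.setdefault ij.1 []
      (stk, pairs', d2)
  else st   -- '.' -> nothing

def pvRunA (o c : Char) : List Char → Int →
    List Int × List (Int × Int) × PySem.Dict Int (List (Int × Int)) →
    List Int × List (Int × Int) × PySem.Dict Int (List (Int × Int))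
  | [], _, st => st
  | ch :: rest, pos, st => pvRunA o c rest (pos + 1) (pvStepA o c st pos ch)

def parse_pairs_tree_general (dotbr : String) (bracket_type : String) :
    (List (Int × Int)) × (List (Int × List (Int × Int))) :=
  match bracket_type.toList with
  | [o, c] =>
    let r := pvRunA o c dotbr.toList 1 ([], [], PySem.Dict.empty)
    -- for key in children_of: children_of[key].sort(key=p[0]);  pairs.sort(key=p[0])
    (PySem.List.sorted r.2.1 (fun p => p.1) false,
     r.2.2.items.map (fun kv => (kv.1, PySem.List.sorted kv.2 (fun p => p.1) false)))
  | _ => ([], [])   -- Python: raise ValueError (excluded by Pre_)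

-- ===== PORT B =====
-- `level(k, parent)` of Source B: consumes chars (1-based cursor `pos`) until an unmatched close
-- char or end of string; returns (remaining suffix, stop position, pre-order pairs, children_of).
-- Fuel = number of remaining characters bounds the loop+recursion (always sufficient).
def pvLevelB (o c : Char) : Nat → List Char → Int → Option Int →
    PySem.Dict Int (List (Int × Int)) →
    List Char × Int × List (Int × Int) × PySem.Dict Int (List (Int × Int))
  | 0, s, pos, _, d => (s, pos, [], d)
  | Nat.succ f, s, pos, parent, d =>
    match s with
    | [] => ([], pos, [], d)
    | ch :: rest =>
      if ch = o then
        let i := pos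
        match pvLevelB o c f rest (pos + 1) (some i) d with
        | ([], pos', sub, d') => ([], pos', sub, d')   -- unmatched open: drop it, keep inner pairs
        | (_ :: rest', pos', sub, d') =>
          let j := pos'
          let d1 := match parent with
            | some p => d'.insert p (d'.getD p [] ++ [(i, j)])   -- setdefault(parent, []).append
            | none => d'
          let d2 := d1.setdefault i []                           -- setdefault(i, [])
          match pvLevelB o c f rest' (pos' + 1) parent d2 with
          | (s'', pos'', more, d3) => (s'', pos'', (i, j) :: (sub ++ more), d3)
      else if ch = c then (s, pos, [], d)
      else pvLevelB o c f rest (pos + 1) parent d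

def parse_pairs_tree_general_alt (dotbr : String) (bracket_type : String) :
    (List (Int × Int)) × (List (Int × List (Int × Int))) :=
  let bl := bracket_type.toList
  if bl.length = 2 then   -- if len(bracket_type) != 2: raise ValueError (excluded by Pre_)
    let o := bl.getD 0 ' '   -- open_char = bracket_type[0]
    let c := bl.getD 1 ' '   -- close_char = bracket_type[1]
    let l := dotbr.toList
    let r := pvLevelB o c l.length l 1 none PySem.Dict.empty
    (r.2.2.1, r.2.2.2.items)
  else ([], [])

-- ===== PRECONDITION & SPEC =====
-- Pre_ excludes exactly the inputs on which A raises: ValueError when bracket_type is not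
-- 2 characters, and IndexError (pop from empty stack) when some prefix of dotbr contains
-- more close than open characters.
def Pre_parse_pairs_tree_general (dotbr : String) (bracket_type : String) : Prop :=
  bracket_type.toList.length = 2 ∧
  ∀ n ∈ List.range (dotbr.toList.length + 1),
    (dotbr.toList.take n).count (bracket_type.toList.getD 1 ' ') ≤
      (dotbr.toList.take n).count (bracket_type.toList.getD 0 ' ')
instance (dotbr : String) (bracket_type : String) : Decidable (Pre_parse_pairs_tree_general dotbr bracket_type) := by unfold Pre_parse_pairs_tree_general; infer_instance

def pvWitness_parse_pairs_tree_general : String × String := ("(.(()))().", "()")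

def Spec_parse_pairs_tree_general (dotbr : String) (bracket_type : String) (out : (List (Int × Int)) × (List (Int × List (Int × Int)))) : Prop := out = parse_pairs_tree_general_alt dotbr bracket_type
instance (dotbr : String) (bracket_type : String) (out : (List (Int × Int)) × (List (Int × List (Int × Int)))) : Decidable (Spec_parse_pairs_tree_general dotbr bracket_type out) := by unfold Spec_parse_pairs_tree_general; infer_instance

-- ===== CLAIM (what is proved, stated in full; the proofs are below) =====
def Claim_equal_parse_pairs_tree_general : Prop := ∀ (dotbr : String) (bracket_type : String), Dom_parse_pairs_tree_general dotbr bracket_type → Pre_parse_pairs_tree_general dotbr bracket_type → Spec_parse_pairs_tree_general dotbr bracket_type (parse_pairs_tree_general dotbr bracket_type)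

-- ===== LEMMAS AND PROOFS =====

-- dict invariant: distinct keys; every stored child list is strictly increasing on the
-- opening index, and all its pairs (x.1, x.2) satisfy x.1 < x.2 < pos
def pvDInv (d : PySem.Dict Int (List (Int × Int))) (pos : Int) : Prop :=
  d.keys.Nodup ∧ ∀ kv ∈ d.items,
    kv.2.Pairwise (fun a b : Int × Int => a.1 < b.1) ∧ ∀ x ∈ kv.2, x.1 < x.2 ∧ x.2 < pos

lemma pvDInv_mono {d : PySem.Dict Int (List (Int × Int))} {pos pos' : Int}
    (h : pvDInv d pos) (hle : pos ≤ pos') : pvDInv d pos' := by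
  refine ⟨h.1, fun kv hkv => ?_⟩
  obtain ⟨h1, h2⟩ := h.2 kv hkv
  exact ⟨h1, fun x hx => ⟨(h2 x hx).1, lt_of_lt_of_le (h2 x hx).2 hle⟩⟩

lemma pvDInv_getD {d : PySem.Dict Int (List (Int × Int))} {pos : Int}
    (h : pvDInv d pos) (q : Int) :
    (d.getD q []).Pairwise (fun a b : Int × Int => a.1 < b.1) ∧
      ∀ x ∈ d.getD q [], x.1 < x.2 ∧ x.2 < pos := by
  rw [PySem.Dict.getD_eq_get?_getD]
  cases hg : d.get? q with
  | none => simp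
  | some v =>
    have := h.2 (q, v) (PySem.Dict.mem_items_of_get?_eq_some d hg)
    simpa using this

lemma pvDInv_insert {d : PySem.Dict Int (List (Int × Int))} {pos : Int} {q : Int}
    {v : List (Int × Int)} (h : pvDInv d pos)
    (h1 : v.Pairwise (fun a b : Int × Int => a.1 < b.1))
    (h2 : ∀ x ∈ v, x.1 < x.2 ∧ x.2 < pos) : pvDInv (d.insert q v) pos := by
  refine ⟨PySem.Dict.nodup_keys_insert d q v h.1, fun kv hkv => ?_⟩
  rcases (PySem.Dict.mem_items_insert d q v kv).1 hkv with h' | ⟨h', _⟩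
  · subst h'; exact ⟨h1, h2⟩
  · exact h.2 kv h'

lemma pvDInv_setdefault {d : PySem.Dict Int (List (Int × Int))} {pos : Int} (q : Int)
    (h : pvDInv d pos) : pvDInv (d.setdefault q []) pos := by
  by_cases hc : d.contains q = true
  · rw [PySem.Dict.setdefault_of_contains _ [] hc]; exact h
  · rw [PySem.Dict.setdefault_of_not_contains _ [] (by simpa using hc)]
    exact pvDInv_insert h (by simp) (by simp)

lemma pvGetD_setdefault_ne {d : PySem.Dict Int (List (Int × Int))} {q k : Int}
    (h : q ≠ k) : (d.setdefault k []).getD q [] = d.getD q [] := by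
  by_cases hc : d.contains k = true
  · rw [PySem.Dict.setdefault_of_contains _ [] hc]
  · rw [PySem.Dict.setdefault_of_not_contains _ [] (by simpa using hc)]
    exact PySem.Dict.getD_insert_of_ne _ _ _ h

-- the main simulation lemma: one call of B's `level` against A's fold
lemma pvMain (o c : Char) : ∀ (f : Nat) (s : List Char) (stk : List Int) (pos : Int)
    (pairs : List (Int × Int)) (d : PySem.Dict Int (List (Int × Int))),
    s.length ≤ f → (∀ x ∈ stk, x < pos) → pvDInv d pos →
    ∃ k ≤ s.length, ∃ padd : List (Int × Int),
      (pvLevelB o c f s pos stk.head? d).1 = s.drop k ∧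
      (pvLevelB o c f s pos stk.head? d).2.1 = pos + k ∧
      padd.Perm (pvLevelB o c f s pos stk.head? d).2.2.1 ∧
      (∀ x ∈ (pvLevelB o c f s pos stk.head? d).2.2.1, pos ≤ x.1 ∧ x.1 < x.2 ∧ x.2 ≤ pos + k) ∧
      (pvLevelB o c f s pos stk.head? d).2.2.1.Pairwise (fun a b : Int × Int => a.1 < b.1) ∧
      pvDInv (pvLevelB o c f s pos stk.head? d).2.2.2 (pos + k) ∧
      (∀ q, q < pos → stk.head? ≠ some q →
        (pvLevelB o c f s pos stk.head? d).2.2.2.getD q [] = d.getD q []) ∧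
      ((pvLevelB o c f s pos stk.head? d).1 = [] →
        ∃ stk', pvRunA o c s pos (stk, pairs, d) =
          (stk', pairs ++ padd, (pvLevelB o c f s pos stk.head? d).2.2.2)) ∧
      ((pvLevelB o c f s pos stk.head? d).1 ≠ [] →
        (pvLevelB o c f s pos stk.head? d).1.head? = some c ∧ c ≠ o ∧
        (s.take k).count c = (s.take k).count o ∧
        pvRunA o c s pos (stk, pairs, d) =
          pvRunA o c (pvLevelB o c f s pos stk.head? d).1 (pos + k)
            (stk, pairs ++ padd, (pvLevelB o c f s pos stk.head? d).2.2.2)) := by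
  intro f
  induction f with
  | zero =>
    intro s stk pos pairs d hf hstk hd
    have hs : s = [] := List.length_eq_zero_iff.1 (Nat.le_zero.1 hf)
    subst hs
    refine ⟨0, by simp, [], by simp [pvLevelB], by simp [pvLevelB], by simp [pvLevelB],
      by simp [pvLevelB], by simp [pvLevelB], by simpa [pvLevelB] using hd,
      by simp [pvLevelB], fun _ => ⟨stk, by simp [pvRunA, pvLevelB]⟩, fun h => absurd (by simp [pvLevelB]) h⟩
  | succ f ih =>
    intro s stk pos pairs d hf hstk hd
    match s with
    | [] =>
      refine ⟨0, by simp, [], by simp [pvLevelB], by simp [pvLevelB], by simp [pvLevelB],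
        by simp [pvLevelB], by simp [pvLevelB], by simpa [pvLevelB] using hd,
        by simp [pvLevelB], fun _ => ⟨stk, by simp [pvRunA, pvLevelB]⟩, fun h => absurd (by simp [pvLevelB]) h⟩
    | ch :: rest =>
      have hf' : rest.length ≤ f := by simpa using hf
      by_cases ho : ch = o
      · -- open branch
        rw [ho]
        rw [ho] at hf
        obtain ⟨k1, hk1, padd1, A1, A2, A3, A4, A5, A6, A7, A8, A9⟩ :=
          ih rest (pos :: stk) (pos + 1) pairs d hf'
            (by intro x hx; rcases List.mem_cons.1 hx with h | h
                · subst h; omega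
                · exact lt_trans (hstk x h) (by omega))
            (pvDInv_mono hd (by omega))
        simp only [List.head?_cons] at A1 A2 A3 A4 A5 A6 A7 A8 A9
        rcases hrc : pvLevelB o c f rest (pos + 1) (some pos) d with ⟨s1, p1, sub1, d1⟩
        rw [hrc] at A1 A2 A3 A4 A5 A6 A7 A8 A9
        dsimp only at A1 A2 A3 A4 A5 A6 A7 A8 A9
        cases s1 with
        | nil =>
          have hred : pvLevelB o c (f + 1) (o :: rest) pos stk.head? d = ([], p1, sub1, d1) := by
            simp [pvLevelB, hrc]
          have hk1' : k1 = rest.length := by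
            have := congrArg List.length A1
            simp [List.length_drop] at this
            omega
          have harith : (pos + 1) + (k1 : Int) = pos + ((rest.length + 1 : Nat) : Int) := by
            rw [hk1']; push_cast; ring
          refine ⟨rest.length + 1, by simp, padd1, ?_, ?_, ?_, ?_, ?_, ?_, ?_, ?_, ?_⟩
          · simp [hred, List.drop_succ_cons]
          · rw [hred, A2, harith]
          · rw [hred]; exact A3
          · rw [hred]; intro x hx
            obtain ⟨u, v, w⟩ := A4 x hx
            refine ⟨by omega, v, by push_cast at w ⊢; omega⟩
          · rw [hred]; exact A5
          · rw [hred, ← harith]; exact A6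
          · rw [hred]; intro q hq hne
            exact A7 q (by omega) (by simp; omega)
          · intro _
            obtain ⟨stk', hs'⟩ := A8 rfl
            refine ⟨stk', ?_⟩
            rw [hred]
            simp only [pvRunA, pvStepA]
            exact hs'
          · intro h1
            rw [hred] at h1
            simp at h1
        | cons ch1 rest1 =>
          obtain ⟨hh1, hco, hcnt1, hrun1⟩ := A9 (by simp)
          have hch1 : ch1 = c := by simpa using hh1
          subst ch1
          rw [← A2] at hrun1
          have hlen1 : rest1.length + 1 + k1 = rest.length := by
            have := congrArg List.length A1
            simp [List.length_drop] at this
            omega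
          have hdd : rest.drop (k1 + 1) = rest1 := by
            have h1 : rest.drop (k1 + 1) = (rest.drop k1).drop 1 := by
              rw [List.drop_drop]
            rw [h1, ← A1]
            rfl
          set dm := (match stk.head? with
            | some p => d1.insert p (d1.getD p [] ++ [(pos, p1)])
            | none => d1) with hdmdef
          have hdminv : pvDInv dm (p1 + 1) := by
            rcases stk with _ | ⟨p, t⟩
            · simp only [List.head?_nil] at hdmdef
              rw [hdmdef]
              exact pvDInv_mono A6 (by omega)
            · have hp : p < pos := hstk p (by simp)
              have hval : d1.getD p [] = d.getD p [] :=
                A7 p (by omega) (by simp; omega)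
              obtain ⟨hpw, hbd⟩ := pvDInv_getD hd p
              simp only [List.head?_cons] at hdmdef
              rw [hdmdef]
              refine pvDInv_insert (pvDInv_mono A6 (by omega)) ?_ ?_
              · rw [hval]
                refine List.pairwise_append.2 ⟨hpw, by simp, ?_⟩
                intro x hx y hy
                simp at hy
                subst hy
                have := hbd x hx
                simp
                omega
              · intro x hx
                rcases List.mem_append.1 hx with h1 | h1
                · rw [hval] at h1
                  have := hbd x h1
                  omega
                · simp at h1
                  subst h1
                  simp
                  omega
          have hgetdm : ∀ q, q < pos → stk.head? ≠ some q → dm.getD q [] = d1.getD q [] := by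
            intro q hq hne
            rcases stk with _ | ⟨p, t⟩
            · simp only [List.head?_nil] at hdmdef
              rw [hdmdef]
            · simp only [List.head?_cons] at hdmdef hne
              rw [hdmdef]
              exact PySem.Dict.getD_insert_of_ne _ _ _ (by intro h; exact hne (by rw [h]))
          have hd2inv : pvDInv (dm.setdefault pos []) (p1 + 1) := pvDInv_setdefault pos hdminv
          obtain ⟨k2, hk2, padd2, B1, B2, B3, B4, B5, B6, B7, B8, B9⟩ :=
            ih rest1 stk (p1 + 1) (pairs ++ padd1 ++ [(pos, p1)]) (dm.setdefault pos [])
              (by omega) (fun x hx => by have := hstk x hx; omega) hd2inv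
          rcases hrc2 : pvLevelB o c f rest1 (p1 + 1) stk.head? (dm.setdefault pos []) with ⟨s2, p2, sub2, d3⟩
          rw [hrc2] at B1 B2 B3 B4 B5 B6 B7 B8 B9
          dsimp only at B1 B2 B3 B4 B5 B6 B7 B8 B9
          have hred : pvLevelB o c (f + 1) (o :: rest) pos stk.head? d =
              (s2, p2, (pos, p1) :: (sub1 ++ sub2), d3) := by
            simp only [pvLevelB, hrc]
            rw [← hdmdef, hrc2]
            simp
          have hstep : pvStepA o c (pos :: stk, pairs ++ padd1, d1) p1 c =
              (stk, (pairs ++ padd1) ++ [(pos, p1)], dm.setdefault pos []) := by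
            have hngt : ¬ pos > p1 := by omega
            rcases stk with _ | ⟨p, t⟩
            · simp only [List.head?_nil] at hdmdef
              simp [pvStepA, hco, hngt, hdmdef]
            · simp only [List.head?_cons] at hdmdef
              simp [pvStepA, hco, hngt, hdmdef]
          have hrunmid : pvRunA o c (o :: rest) pos (stk, pairs, d) =
              pvRunA o c rest1 (p1 + 1) (stk, pairs ++ padd1 ++ [(pos, p1)], dm.setdefault pos []) := by
            have h1 : pvRunA o c (o :: rest) pos (stk, pairs, d) =
                pvRunA o c rest (pos + 1) (pos :: stk, pairs, d) := by
              simp [pvRunA, pvStepA]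
            rw [h1, hrun1]
            show pvRunA o c rest1 (p1 + 1) (pvStepA o c (pos :: stk, pairs ++ padd1, d1) p1 c) = _
            rw [hstep, List.append_assoc]
          have harith2 : (p1 + 1) + (k2 : Int) = pos + ((k1 + k2 + 2 : Nat) : Int) := by
            push_cast
            omega
          refine ⟨k1 + k2 + 2, by simp; omega, padd1 ++ [(pos, p1)] ++ padd2, ?_, ?_, ?_, ?_, ?_, ?_, ?_, ?_, ?_⟩
          · rw [hred]
            simp only [List.drop_succ_cons]
            rw [B1, ← hdd, List.drop_drop]
            congr 1
            omega
          · rw [hred]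
            show p2 = _
            omega
          · rw [hred]
            have e1 : ((padd1 ++ [(pos, p1)]) ++ padd2).Perm ((sub1 ++ [(pos, p1)]) ++ sub2) :=
              (A3.append (List.Perm.refl _)).append B3
            have e2 : ((sub1 ++ [(pos, p1)]) ++ sub2).Perm (([(pos, p1)] ++ sub1) ++ sub2) :=
              List.perm_append_comm.append (List.Perm.refl sub2)
            exact (e1.trans e2).trans (List.Perm.of_eq (by simp))
          · rw [hred]
            intro x hx
            rcases List.mem_cons.1 hx with h1 | h1
            · subst h1
              refine ⟨le_refl _, by omega, by push_cast; omega⟩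
            rcases List.mem_append.1 h1 with h2 | h2
            · obtain ⟨u, v, w⟩ := A4 x h2
              exact ⟨by omega, v, by push_cast; omega⟩
            · obtain ⟨u, v, w⟩ := B4 x h2
              exact ⟨by omega, v, by push_cast; omega⟩
          · rw [hred]
            refine List.pairwise_cons.2 ⟨?_, List.pairwise_append.2 ⟨A5, B5, ?_⟩⟩
            · intro y hy
              rcases List.mem_append.1 hy with h2 | h2
              · have := (A4 y h2).1; omega
              · have := (B4 y h2).1; omega
            · intro x hx y hy
              have hx2 := (A4 x hx).2.2
              have hx1 := (A4 x hx).2.1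
              have hy1 := (B4 y hy).1
              omega
          · rw [hred, ← harith2]
            exact B6
          · rw [hred]
            intro q hq hne
            rw [B7 q (by omega) hne, pvGetD_setdefault_ne (by omega), hgetdm q hq hne,
              A7 q (by omega) (by simp; omega)]
          · rw [hred]
            intro h2
            obtain ⟨stk'', hs''⟩ := B8 h2
            refine ⟨stk'', ?_⟩
            rw [hrunmid, hs'']
            simp [List.append_assoc]
          · rw [hred]
            intro h2
            obtain ⟨g1, g2, g3, g4⟩ := B9 h2
            refine ⟨g1, g2, ?_, ?_⟩
            · have htk : (o :: rest).take (k1 + k2 + 2) = o :: (rest.take k1 ++ c :: rest1.take k2) := by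
                simp only [List.take_succ_cons]
                rw [show k1 + k2 + 1 = k1 + (k2 + 1) from by omega, List.take_add, ← A1]
                rfl
              rw [htk]
              have hco2 : ¬ (c = o) := g2
              have hoc2 : ¬ (o = c) := fun h => g2 (Eq.symm h)
              simp [List.count_append, hco2, hoc2]
              omega
            · rw [hrunmid, g4, harith2]
              simp [List.append_assoc]
      · by_cases hc : ch = c
        · -- close branch: stop here
          have hco : ¬ c = o := fun h => ho (hc.trans h)
          have hred : pvLevelB o c (f + 1) (ch :: rest) pos stk.head? d = (ch :: rest, pos, [], d) := by
            simp [pvLevelB, hc, hco]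
          refine ⟨0, by simp, [], by simp [hred], by simp [hred], by simp [hred],
            by simp [hred], by simp [hred], by simpa [hred] using hd, by simp [hred],
            fun h => absurd h (by simp [hred]), fun _ => ?_⟩
          refine ⟨by rw [hred]; simp [hc], fun h => ho (by rw [hc, h]), by simp, ?_⟩
          simp [hred]
        · -- '.' branch
          obtain ⟨k1, hk1, padd1, A1, A2, A3, A4, A5, A6, A7, A8, A9⟩ :=
            ih rest stk (pos + 1) pairs d hf'
              (fun x hx => lt_trans (hstk x hx) (by omega))
              (pvDInv_mono hd (by omega))
          have hred : pvLevelB o c (f + 1) (ch :: rest) pos stk.head? d =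
              pvLevelB o c f rest (pos + 1) stk.head? d := by
            simp [pvLevelB, ho, hc]
          have harith : (pos + 1) + (k1 : Int) = pos + ((k1 + 1 : Nat) : Int) := by push_cast; ring
          refine ⟨k1 + 1, by simp; omega, padd1, ?_, ?_, ?_, ?_, ?_, ?_, ?_, ?_, ?_⟩
          · rw [hred, A1]; simp
          · rw [hred, A2, harith]
          · rw [hred]; exact A3
          · rw [hred]; intro x hx
            obtain ⟨u, v, w⟩ := A4 x hx
            refine ⟨by omega, v, by push_cast; omega⟩
          · rw [hred]; exact A5
          · rw [hred, ← harith]; exact A6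
          · rw [hred]; intro q hq hne; exact A7 q (by omega) hne
          · rw [hred]; intro h1
            obtain ⟨stk', hs'⟩ := A8 h1
            exact ⟨stk', by simp only [pvRunA, pvStepA, if_neg ho, if_neg hc]; exact hs'⟩
          · rw [hred]; intro h1
            obtain ⟨hh1, hh2, hh3, hh4⟩ := A9 h1
            refine ⟨hh1, hh2, ?_, ?_⟩
            · simp [List.take_succ_cons, ho, hc, hh3]
            · simp only [pvRunA, pvStepA, if_neg ho, if_neg hc]
              rw [hh4, harith]

lemma pvMapItems (l : List (Int × List (Int × Int)))
    (h : ∀ kv ∈ l, kv.2.Pairwise (fun a b : Int × Int => a.1 < b.1)) :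
    l.map (fun kv => (kv.1, PySem.List.sorted kv.2 (fun p => p.1) false)) = l := by
  induction l with
  | nil => rfl
  | cons kv t ih =>
    simp only [List.map_cons]
    rw [PySem.List.sorted_eq_self_of_pairwise kv.2 _ ((h kv (by simp)).imp (fun hab => le_of_lt hab))]
    rw [ih (fun x hx => h x (by simp [hx]))]

-- ===== VERDICT (by name: the statement is the Claim_ definition above) =====
theorem parse_pairs_tree_general_spec : Claim_equal_parse_pairs_tree_general := by
  intro dotbr bracket_type _ hpre
  obtain ⟨hlen, hbal⟩ := hpre
  obtain ⟨o, c, hb⟩ := List.length_eq_two.1 hlen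
  unfold Spec_parse_pairs_tree_general
  have hinv : pvDInv PySem.Dict.empty 1 := by
    constructor
    · simp [PySem.Dict.keys_empty]
    · intro kv hkv; simp [PySem.Dict.empty] at hkv
  obtain ⟨k, hk, padd, H1, H2, H3, H4, H5, H6, H7, H8, H9⟩ :=
    pvMain o c dotbr.toList.length dotbr.toList [] 1 [] PySem.Dict.empty
      (le_refl _) (by simp) hinv
  set r := pvLevelB o c dotbr.toList.length dotbr.toList 1 ([] : List Int).head? PySem.Dict.empty with hr
  have hnil : r.1 = [] := by
    by_contra hne
    obtain ⟨hhd, hco, hcnt, _⟩ := H9 hne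
    have hklt : k < dotbr.toList.length := by
      by_contra hge
      have : k = dotbr.toList.length := le_antisymm hk (not_lt.1 hge)
      rw [H1, this, List.drop_length] at hne; exact hne rfl
    have hdrop : (dotbr.toList.drop k).take 1 = [c] := by
      rw [← H1]
      cases h1 : r.1 with
      | nil => exact absurd h1 hne
      | cons a t => rw [h1] at hhd; simp at hhd; simp [hhd]
    have htake : dotbr.toList.take (k + 1) = dotbr.toList.take k ++ [c] := by
      rw [List.take_add, hdrop]
    have hb2 := hbal (k + 1) (List.mem_range.2 (by omega))
    rw [hb, htake] at hb2
    simp [List.count_append] at hb2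
    rw [hcnt] at hb2
    have hoc : ¬ (o = c) := fun h => hco (Eq.symm h)
    simp [hoc] at hb2
  obtain ⟨stk', hrun⟩ := H8 hnil
  simp only [parse_pairs_tree_general, parse_pairs_tree_general_alt, hb]
  rw [if_pos (by simp : ([o, c] : List Char).length = 2)]
  simp only [List.getD_cons_zero, List.getD_cons_succ]
  rw [hrun]
  have hpairs : PySem.List.sorted ([] ++ padd : List (Int × Int)) (fun p => p.1) false = r.2.2.1 := by
    rw [List.nil_append]
    exact PySem.List.sorted_eq_of_perm_of_pairwise_lt padd r.2.2.1 _ H3.symm H5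
  simp only [hpairs]
  rw [pvMapItems r.2.2.2.items (fun kv hkv => (H6.2 kv hkv).1)]
  simp only [List.head?_nil] at hr
  rw [← hr]
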